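-- pv_equiv track=rewrite | github.com/antocuni/antocuni.github.io | blog/talk/2025/09/core-dev-sprint-pypy-jit/pythagorean.py | count_triples_iter
-- ===== SOURCE A (Python) =====
-- import math
--
-- class RangeProductIter:
--
--     def __init__(self, a, b):
--         self.i, self.n = a
--         self.j, self.m = b
--
--     def __iter__(self):
--         return self
--
--     def __next__(self):
--         if self.i >= self.n:
--             raise StopIteration
--         value = (self.i, self.j)
--         self.j += 1
--         if self.j >= self.m:
--             self.j = 0
--             self.i += 1
--         return value
--
-- def count_triples_iter(P):
--     m_max = int((math.isqrt(2 * P)))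
--     count = 0
--     for m, n in RangeProductIter((1, m_max + 1), (1, m_max + 1)):
--         if ((m - n) & 1) and math.gcd(m, n) == 1:
--             p0 = 2 * m * (m + n)  # a+b+c
--             if p0 > P:
--                 continue
--             count += P // p0
--     return count
-- ===== SOURCE B (Python) =====
-- import math
--
-- def count_triples_iter(P):
--     # Same sum as A, reparametrized: s = m + n.  (m-n) odd <=> s odd, and
--     # gcd(m, n) == gcd(m, s), so we walk only odd s, capped by P // (2*m).
--     M = math.isqrt(2 * P)
--     total = 0
--     for m in range(1, M + 1):
--         hi = min(m + M, P // (2 * m))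
--         start = m + 1 if (m + 1) % 2 == 1 else m + 2
--         for s in range(start, hi + 1, 2):
--             if math.gcd(m, s) == 1:
--                 total += P // (2 * m * s)
--     return total
-- ===== Notes on version B (the rewrite author's own statement) =====
-- stated objective: faster
-- what changed: Replaces A's custom RangeProductIter over all M^2 pairs (m,n) with a loop over m and s=m+n that visits only odd s (step 2) and caps s at P//(2*m), so pairs whose perimeter already exceeds P are never generated.
import Mathlib
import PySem

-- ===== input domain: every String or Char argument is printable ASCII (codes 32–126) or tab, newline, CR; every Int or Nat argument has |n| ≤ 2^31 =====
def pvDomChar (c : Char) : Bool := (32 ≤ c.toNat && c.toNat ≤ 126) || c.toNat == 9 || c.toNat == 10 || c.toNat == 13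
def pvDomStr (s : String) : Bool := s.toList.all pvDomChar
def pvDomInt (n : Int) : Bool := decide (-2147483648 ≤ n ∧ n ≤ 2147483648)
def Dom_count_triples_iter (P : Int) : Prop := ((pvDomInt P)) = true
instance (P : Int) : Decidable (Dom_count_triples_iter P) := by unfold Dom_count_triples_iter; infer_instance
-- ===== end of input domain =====

-- B replaces A's custom product iterator over all pairs (m, n) by a loop over m and s = m + n
-- that visits only odd s and caps s at P // (2*m); same return value for every nonnegative P.

-- ===== PORT A =====
-- termination helpers for the transliterated iterator loop (cited in decreasing_by)
lemma pvMeasA (N M i j : Int) (hi : ¬ N ≤ i) :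
    (N - (i + 1)).toNat * (M.toNat + 1) + (M - 0).toNat
      < (N - i).toNat * (M.toNat + 1) + (M - j).toNat := by
  have hA : (N - i).toNat = (N - (i + 1)).toNat + 1 := by omega
  rw [hA]
  calc (N - (i + 1)).toNat * (M.toNat + 1) + (M - 0).toNat
      < (N - (i + 1)).toNat * (M.toNat + 1) + ((M.toNat + 1) + (M - j).toNat) := by
        have : (M - 0).toNat < (M.toNat + 1) + (M - j).toNat := by omega
        exact Nat.add_lt_add_left this _
    _ = ((N - (i + 1)).toNat + 1) * (M.toNat + 1) + (M - j).toNat := by ring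

lemma pvMeasB (N M i j : Int) (hj : ¬ M ≤ j + 1) :
    (N - i).toNat * (M.toNat + 1) + (M - (j + 1)).toNat
      < (N - i).toNat * (M.toNat + 1) + (M - j).toNat := by
  have : (M - (j + 1)).toNat < (M - j).toNat := by omega
  exact Nat.add_lt_add_left this _

-- RangeProductIter((1, m_max+1), (1, m_max+1)) driving the for-loop body, as one tail recursion
-- on the iterator state (i, j) and the running count.
def pvALoop (P N M i j count : Int) : Int :=
  if _hs : N ≤ i then count
  else
    let m := i
    let n := j
    let j1 := j + 1
    let i' := if M ≤ j1 then i + 1 else i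
    let j' := if M ≤ j1 then 0 else j1
    -- (m - n) & 1 is (m - n) % 2 for Python ints; math.gcd → Int.gcd (both nonnegative)
    let count' :=
      if PySem.Int.mod (m - n) 2 = 1 ∧ Int.gcd m n = 1 then
        (let p0 := 2 * m * (m + n)
         if P < p0 then count else count + PySem.Int.floordiv P p0)
      else count
    pvALoop P N M i' j' count'
termination_by (N - i).toNat * (M.toNat + 1) + (M - j).toNat
decreasing_by
  split_ifs with h
  · exact pvMeasA N M i j _hs
  · exact pvMeasB N M i j h

def count_triples_iter (P : Int) : Int :=
  -- int(math.isqrt(2*P)) → Nat.sqrt: exact for 2*P ≥ 0; negative P raises ValueError (Pre_)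
  let m_max : Int := ((Nat.sqrt (2 * P).toNat : Nat) : Int)
  pvALoop P (m_max + 1) (m_max + 1) 1 1 0

-- ===== PORT B =====
def count_triples_iter_alt (P : Int) : Int :=
  -- math.isqrt(2*P) → Nat.sqrt, as in the A port; negative P raises ValueError (Pre_)
  let M : Int := ((Nat.sqrt (2 * P).toNat : Nat) : Int)
  (PySem.List.pyRange 1 (M + 1) 1).foldl (fun total m =>
    let hi := min (m + M) (PySem.Int.floordiv P (2 * m))
    let start := if PySem.Int.mod (m + 1) 2 = 1 then m + 1 else m + 2
    (PySem.List.pyRange start (hi + 1) 2).foldl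
      (fun total s =>
        if Int.gcd m s = 1 then total + PySem.Int.floordiv P (2 * m * s) else total)
      total) 0

-- ===== PRECONDITION & SPEC =====
-- Pre_ excludes exactly P < 0, where Python's math.isqrt(2*P) raises ValueError in both A and B.
def Pre_count_triples_iter (P : Int) : Prop := 0 ≤ P
instance (P : Int) : Decidable (Pre_count_triples_iter P) := by
  unfold Pre_count_triples_iter; infer_instance

def pvWitness_count_triples_iter : Int := (12)

def Spec_count_triples_iter (P : Int) (out : Int) : Prop := out = count_triples_iter_alt P
instance (P : Int) (out : Int) : Decidable (Spec_count_triples_iter P out) := by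
  unfold Spec_count_triples_iter; infer_instance

-- ===== CLAIM (what is proved, stated in full; the proofs are below) =====
def Claim_equal_count_triples_iter : Prop :=
  ∀ (P : Int), Dom_count_triples_iter P → Pre_count_triples_iter P →
    Spec_count_triples_iter P (count_triples_iter P)

-- ===== LEMMAS AND PROOFS =====

-- the per-pair contribution of A's loop body
def pvF (P m n : Int) : Int :=
  if PySem.Int.mod (m - n) 2 = 1 ∧ Int.gcd m n = 1 ∧ 2 * m * (m + n) ≤ P then
    PySem.Int.floordiv P (2 * m * (m + n))
  else 0

def pvRow (P i a b : Int) : Int := ((PySem.List.pyRange a b 1).map (pvF P i)).sum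

def pvRows (P a N M : Int) : Int :=
  ((PySem.List.pyRange a N 1).map (fun x => pvRow P x 0 M)).sum

lemma pvALoop_body (P i j c : Int) :
    (if PySem.Int.mod (i - j) 2 = 1 ∧ Int.gcd i j = 1 then
        (let p0 := 2 * i * (i + j)
         if P < p0 then c else c + PySem.Int.floordiv P p0)
      else c) = c + pvF P i j := by
  unfold pvF
  split_ifs with h1 h2 h3 <;> simp_all <;> omega

lemma pvRows_cons (P a N M : Int) (h : a < N) :
    pvRows P a N M = pvRow P a 0 M + pvRows P (a + 1) N M := by
  unfold pvRows; rw [PySem.List.pyRange_one_cons h]; simp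

lemma pvRows_nil (P a N M : Int) (h : N ≤ a) : pvRows P a N M = 0 := by
  unfold pvRows; rw [PySem.List.pyRange_one_eq_nil h]; simp

lemma pvRow_cons (P x a b : Int) (h : a < b) :
    pvRow P x a b = pvF P x a + pvRow P x (a + 1) b := by
  unfold pvRow; rw [PySem.List.pyRange_one_cons h]; simp

lemma pvRow_nil (P x a b : Int) (h : b ≤ a) : pvRow P x a b = 0 := by
  unfold pvRow; rw [PySem.List.pyRange_one_eq_nil h]; simp

-- the iterator-loop invariant: pvALoop finishes the current row from column j, then the rest
lemma pvALoop_eq (P N M : Int) : ∀ (i j c : Int), 0 ≤ j → j < M →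
    pvALoop P N M i j c
      = c + (if i < N then pvRow P i j M + pvRows P (i + 1) N M else 0) := by
  intro i j c
  induction i, j, c using pvALoop.induct (P := P) (N := N) (M := M) with
  | case1 i j c h =>
    intro hj0 hjM
    rw [pvALoop, dif_pos h, if_neg (by omega)]; ring
  | case2 i j c h m n j1 i' j' count' ih =>
    intro hj0 hjM
    have hi' : i' = if M ≤ j + 1 then i + 1 else i := rfl
    have hj'' : j' = if M ≤ j + 1 then 0 else j + 1 := rfl
    have hc' : count' = c + pvF P i j := by
      show (if PySem.Int.mod (i - j) 2 = 1 ∧ Int.gcd i j = 1 then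
        (let p0 := 2 * i * (i + j)
         if P < p0 then c else c + PySem.Int.floordiv P p0)
      else c) = c + pvF P i j
      exact pvALoop_body P i j c
    rw [pvALoop, dif_neg h]
    show pvALoop P N M i' j' count' = _
    by_cases hM : M ≤ j + 1
    · have hj : j = M - 1 := by omega
      rw [ih (by rw [hj'']; split <;> omega) (by rw [hj'']; split <;> omega)]
      rw [hc', hi', hj'', if_pos hM, if_pos hM]
      subst hj
      by_cases hiN : i + 1 < N
      · rw [if_pos hiN, if_pos (by omega), pvRows_cons P (i+1) N M (by omega)]
        have hrow : pvRow P i (M - 1) M = pvF P i (M - 1) := by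
          rw [pvRow_cons P i (M-1) M (by omega), pvRow_nil P i (M-1+1) M (by omega)]; ring
        rw [hrow]; ring
      · rw [if_neg hiN, if_pos (by omega), pvRows_nil P (i+1) N M (by omega)]
        have hrow : pvRow P i (M - 1) M = pvF P i (M - 1) := by
          rw [pvRow_cons P i (M-1) M (by omega), pvRow_nil P i (M-1+1) M (by omega)]; ring
        rw [hrow]; ring
    · rw [ih (by rw [hj'']; split <;> omega) (by rw [hj'']; split <;> omega)]
      rw [hc', hi', hj'', if_neg hM, if_neg hM]
      rw [if_pos (by omega), if_pos (by omega)]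
      rw [pvRow_cons P i j M (by omega)]
      ring

-- step-2 ranges: nil and cons forms
lemma pvRange_two_nil (a b : Int) (h : b ≤ a) : PySem.List.pyRange a b 2 = [] := by
  rw [PySem.List.pyRange_of_pos a b (by norm_num), if_neg (by omega)]
  simp

lemma pvRange_two_cons (a b : Int) (h : a < b) :
    PySem.List.pyRange a b 2 = a :: PySem.List.pyRange (a + 2) b 2 := by
  rw [PySem.List.pyRange_of_pos a b (by norm_num),
      PySem.List.pyRange_of_pos (a + 2) b (by norm_num), if_pos h]
  by_cases hb : a + 2 < b
  · rw [if_pos hb]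
    have hc : ((b - a + 2 - 1) / 2).toNat = ((b - (a + 2) + 2 - 1) / 2).toNat + 1 := by omega
    rw [hc, List.range_succ_eq_map]
    simp only [List.map_cons, List.map_map]
    congr 1
    · simp
    · apply List.map_congr_left
      intro k _
      simp [Function.comp, Nat.succ_eq_add_one]
      ring
  · rw [if_neg hb]
    have hc : ((b - a + 2 - 1) / 2).toNat = 1 := by omega
    rw [hc]
    simp

-- an odd-guarded sum over a step-1 range with odd left end is the step-2 sum
lemma pvOddSum (f : Int → Int) : ∀ (n : ℕ) (a b : Int), (b - a).toNat ≤ n → a % 2 = 1 →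
    ((PySem.List.pyRange a b 1).map (fun s => if s % 2 = 1 then f s else 0)).sum
      = ((PySem.List.pyRange a b 2).map f).sum := by
  intro n
  induction n with
  | zero =>
    intro a b hn ha
    rw [PySem.List.pyRange_one_eq_nil (by omega), pvRange_two_nil a b (by omega)]
    simp
  | succ n IH =>
    intro a b hn ha
    by_cases h : a < b
    · rw [PySem.List.pyRange_one_cons h, pvRange_two_cons a b h]
      simp only [List.map_cons, List.sum_cons, if_pos ha]
      congr 1
      by_cases h2 : a + 1 < b
      · rw [PySem.List.pyRange_one_cons h2]
        simp only [List.map_cons, List.sum_cons, if_neg (by omega : ¬ (a + 1) % 2 = 1)]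
        rw [show a + 1 + 1 = a + 2 by ring, IH (a + 2) b (by omega) (by omega)]
        ring
      · rw [PySem.List.pyRange_one_eq_nil (by omega), pvRange_two_nil (a + 2) b (by omega)]
        simp
    · rw [PySem.List.pyRange_one_eq_nil (by omega), pvRange_two_nil a b (by omega)]
      simp

-- B's inner loop as a sum
lemma pvFoldlIf (c : Int → Prop) [DecidablePred c] (g : Int → Int) (l : List Int) (a : Int) :
    l.foldl (fun t s => if c s then t + g s else t) a
      = a + (l.map (fun s => if c s then g s else 0)).sum := by
  have hf : (fun (t s : Int) => if c s then t + g s else t)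
      = fun t s => t + (if c s then g s else 0) := by
    funext t s; split <;> simp
  rw [hf, PySem.List.foldl_add]

-- the per-m equality: B's pruned, odd-only inner sum equals A's row over n ∈ [1, M0]
lemma pvInnerRow (P M0 m : Int) (hm : 1 ≤ m) :
    ((PySem.List.pyRange (if PySem.Int.mod (m + 1) 2 = 1 then m + 1 else m + 2)
        ((min (m + M0) (PySem.Int.floordiv P (2 * m))) + 1) 2).map
      (fun s => if Int.gcd m s = 1 then PySem.Int.floordiv P (2 * m * s) else 0)).sum
      = pvRow P m 1 (M0 + 1) := by
  have h2m : (0:Int) < 2 * m := by omega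
  set hi := min (m + M0) (PySem.Int.floordiv P (2 * m)) with hhi
  set g2 : Int → Int := fun s => if Int.gcd m s = 1 then PySem.Int.floordiv P (2 * m * s) else 0
    with hg2
  have hhiM : hi ≤ m + M0 := min_le_left _ _
  have hstart : (if PySem.Int.mod (m + 1) 2 = 1 then m + 1 else m + 2)
      = (if (m + 1) % 2 = 1 then m + 1 else m + 2) := by
    rw [PySem.Int.mod_eq_emod_of_pos (by norm_num : (0:Int) < 2)]
  -- Step 1: the row as a sum over s = m + n
  have hrow : pvRow P m 1 (M0 + 1)
      = ((PySem.List.pyRange (m + 1) (m + 1 + M0) 1).map (fun s => pvF P m (s - m))).sum := by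
    unfold pvRow
    rw [PySem.List.pyRange_one, PySem.List.pyRange_one, List.map_map, List.map_map]
    rw [show (m + 1 + M0 - (m + 1)) = M0 + 1 - 1 by ring]
    apply congrArg
    apply List.map_congr_left
    intro k _
    simp only [Function.comp]
    rw [show m + 1 + (k:Int) - m = 1 + k by ring]
  rw [hrow, hstart]
  -- Step 2: pointwise rewrite pvF to the s-form
  have hpt : ∀ s : Int, m + 1 ≤ s → s ≤ m + M0 →
      pvF P m (s - m) = (if s % 2 = 1 ∧ Int.gcd m s = 1 ∧ s ≤ hi then
        PySem.Int.floordiv P (2 * m * s) else 0) := by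
    intro s hs1 hs2
    unfold pvF
    have e1 : PySem.Int.mod (m - (s - m)) 2 = 1 ↔ s % 2 = 1 := by
      rw [PySem.Int.mod_eq_emod_of_pos (by norm_num : (0:Int) < 2)]
      omega
    have e2 : Int.gcd m (s - m) = Int.gcd m s := by
      have := Int.gcd_add_self_right m (s - m)
      rw [show s - m + m = s by ring] at this
      exact this.symm
    have e3 : 2 * m * s ≤ P ↔ s ≤ hi := by
      rw [hhi]
      constructor
      · intro hle
        refine le_min hs2 ?_
        rw [PySem.Int.le_floordiv_iff_mul_le h2m]
        nlinarith
      · intro hle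
        have := le_trans hle (min_le_right _ _)
        rw [PySem.Int.le_floordiv_iff_mul_le h2m] at this
        nlinarith
    rw [show m + (s - m) = s by ring]
    simp only [e1, e2, e3]
  -- Step 3: truncate at hi and convert to the step-2 sum
  by_cases hcase : hi < m + 1
  · -- left sum is all zeros, right step-2 range is empty
    have hl : ∀ x ∈ (PySem.List.pyRange (m + 1) (m + 1 + M0) 1).map (fun s => pvF P m (s - m)),
        x = 0 := by
      intro x hx
      simp only [List.mem_map] at hx
      obtain ⟨s, hs, rfl⟩ := hx
      rw [PySem.List.mem_pyRange_one] at hs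
      rw [hpt s (by omega) (by omega), if_neg (by omega)]
    rw [List.sum_eq_zero hl,
        pvRange_two_nil _ _ (by split <;> omega)]
    simp
  · -- m ≤ hi : split the full range at hi + 1
    push Not at hcase
    rw [PySem.List.pyRange_one_append (m + 1) (hi + 1) (m + 1 + M0) (by omega) (by omega)]
    rw [List.map_append, List.sum_append]
    have htail : ∀ x ∈ (PySem.List.pyRange (hi + 1) (m + 1 + M0) 1).map
        (fun s => pvF P m (s - m)), x = 0 := by
      intro x hx
      simp only [List.mem_map] at hx
      obtain ⟨s, hs, rfl⟩ := hx
      rw [PySem.List.mem_pyRange_one] at hs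
      rw [hpt s (by omega) (by omega), if_neg (by omega)]
    rw [List.sum_eq_zero htail, add_zero]
    have hhead : (PySem.List.pyRange (m + 1) (hi + 1) 1).map (fun s => pvF P m (s - m))
        = (PySem.List.pyRange (m + 1) (hi + 1) 1).map (fun s => if s % 2 = 1 then g2 s else 0) := by
      apply List.map_congr_left
      intro s hs
      rw [PySem.List.mem_pyRange_one] at hs
      rw [hpt s (by omega) (by omega)]
      have hsle : s ≤ hi := by omega
      simp only [hg2]
      split_ifs <;> first | rfl | (exfalso; tauto)
    rw [hhead]
    by_cases hpar : (m + 1) % 2 = 1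
    · rw [if_pos hpar]
      exact (pvOddSum g2 (hi + 1 - (m + 1)).toNat (m + 1) (hi + 1) (by omega) hpar).symm
    · rw [if_neg hpar]
      by_cases hlt : m + 1 < hi + 1
      · rw [PySem.List.pyRange_one_cons hlt, List.map_cons, List.sum_cons, if_neg hpar, zero_add]
        rw [show m + 1 + 1 = m + 2 by ring]
        exact (pvOddSum g2 (hi + 1 - (m + 2)).toNat (m + 2) (hi + 1) (by omega) (by omega)).symm
      · rw [PySem.List.pyRange_one_eq_nil (by omega), pvRange_two_nil (m + 2) (hi + 1) (by omega)]
        simp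

-- ===== VERDICT (by name: the statement is the Claim_ definition above) =====
theorem count_triples_iter_spec : Claim_equal_count_triples_iter := by
  intro P _hD _hP
  unfold Spec_count_triples_iter
  set M0 : Int := ((Nat.sqrt (2 * P).toNat : Nat) : Int) with hM0
  have hbody : (fun (total m : Int) =>
      (PySem.List.pyRange (if PySem.Int.mod (m + 1) 2 = 1 then m + 1 else m + 2)
        ((min (m + M0) (PySem.Int.floordiv P (2 * m))) + 1) 2).foldl
        (fun total s =>
          if Int.gcd m s = 1 then total + PySem.Int.floordiv P (2 * m * s) else total) total)
      = fun (total m : Int) => total +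
        ((PySem.List.pyRange (if PySem.Int.mod (m + 1) 2 = 1 then m + 1 else m + 2)
          ((min (m + M0) (PySem.Int.floordiv P (2 * m))) + 1) 2).map
          (fun s => if Int.gcd m s = 1 then PySem.Int.floordiv P (2 * m * s) else 0)).sum := by
    funext total m
    exact pvFoldlIf (fun s => Int.gcd m s = 1) _ _ _
  have hB : count_triples_iter_alt P
      = ((PySem.List.pyRange 1 (M0 + 1) 1).map (fun m => pvRow P m 1 (M0 + 1))).sum := by
    show (PySem.List.pyRange 1 (M0 + 1) 1).foldl (fun total m =>
        (PySem.List.pyRange (if PySem.Int.mod (m + 1) 2 = 1 then m + 1 else m + 2)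
          ((min (m + M0) (PySem.Int.floordiv P (2 * m))) + 1) 2).foldl
          (fun total s =>
            if Int.gcd m s = 1 then total + PySem.Int.floordiv P (2 * m * s) else total)
          total) 0 = _
    rw [hbody, PySem.List.foldl_add, zero_add]
    apply congrArg
    apply List.map_congr_left
    intro m hmem
    rw [PySem.List.mem_pyRange_one] at hmem
    exact pvInnerRow P M0 m (by omega)
  have hA : count_triples_iter P
      = ((PySem.List.pyRange 1 (M0 + 1) 1).map (fun m => pvRow P m 1 (M0 + 1))).sum := by
    show pvALoop P (M0 + 1) (M0 + 1) 1 1 0 = _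
    by_cases h1 : 1 ≤ M0
    · rw [pvALoop_eq P (M0 + 1) (M0 + 1) 1 1 0 (by omega) (by omega),
          if_pos (by omega), zero_add]
      have hx : pvRows P 2 (M0 + 1) (M0 + 1)
          = ((PySem.List.pyRange 2 (M0 + 1) 1).map (fun x => pvRow P x 1 (M0 + 1))).sum := by
        unfold pvRows
        apply congrArg
        apply List.map_congr_left
        intro x hx
        rw [PySem.List.mem_pyRange_one] at hx
        rw [pvRow_cons P x 0 (M0 + 1) (by omega)]
        have hF0 : pvF P x 0 = 0 := by
          unfold pvF
          rw [if_neg]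
          rintro ⟨-, hg, -⟩
          have : x.natAbs = 1 := by simpa using hg
          omega
        rw [hF0, zero_add, show (0:Int) + 1 = 1 by ring]
      rw [show (1:Int) + 1 = 2 by ring, hx, PySem.List.pyRange_one_cons (show (1:Int) < M0 + 1 by omega),
          List.map_cons, List.sum_cons]
      norm_num
    · have hz : M0 = 0 := by omega
      rw [pvALoop, dif_pos (by omega), hz]
      rw [PySem.List.pyRange_one_eq_nil (by omega)]
      simp
  rw [hA, hB]
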